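-- pv_equiv track=rewrite | github.com/GaryOcean428/pantheon-chat | qig-backend/semantic_classifier.py | _is_antonym
-- ===== SOURCE A (Python) =====
-- ANTONYM_PREFIXES = {
--     'un': ['happy', 'known', 'clear', 'certain', 'fair', 'common', 'usual'],
--     'dis': ['agree', 'like', 'appear', 'connect', 'continue', 'honest'],
--     'in': ['complete', 'correct', 'dependent', 'direct', 'secure', 'valid'],
--     'im': ['possible', 'mature', 'patient', 'perfect', 'mortal', 'mobile'],
--     'ir': ['regular', 'relevant', 'responsible', 'rational', 'reversible'],
--     'non': ['sense', 'existent', 'stop', 'profit', 'violence', 'fiction'],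
--     'anti': ['social', 'war', 'thesis', 'body', 'matter', 'climax'],
-- }
--
-- def _is_antonym(word1: str, word2: str) -> bool:
--     """Check if words are antonyms via prefix negation."""
--     for prefix, stems in ANTONYM_PREFIXES.items():
--         if word1.startswith(prefix):
--             base = word1[len(prefix):]
--             if base == word2:
--                 return True
--         if word2.startswith(prefix):
--             base = word2[len(prefix):]
--             if base == word1:
--                 return True
--
--     return False
-- ===== SOURCE B (Python) =====
-- ANTONYM_PREFIXES = {
--     'un': ['happy', 'known', 'clear', 'certain', 'fair', 'common', 'usual'],
--     'dis': ['agree', 'like', 'appear', 'connect', 'continue', 'honest'],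
--     'in': ['complete', 'correct', 'dependent', 'direct', 'secure', 'valid'],
--     'im': ['possible', 'mature', 'patient', 'perfect', 'mortal', 'mobile'],
--     'ir': ['regular', 'relevant', 'responsible', 'rational', 'reversible'],
--     'non': ['sense', 'existent', 'stop', 'profit', 'violence', 'fiction'],
--     'anti': ['social', 'war', 'thesis', 'body', 'matter', 'climax'],
-- }
--
-- def _is_antonym(word1: str, word2: str) -> bool:
--     """Check if words are antonyms via prefix negation."""
--     for a, b in ((word1, word2), (word2, word1)):
--         if a.endswith(b) and a[:len(a) - len(b)] in ANTONYM_PREFIXES: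
--             return True
--     return False
-- ===== Notes on version B (the rewrite author's own statement) =====
-- stated objective: simpler
-- what changed: Instead of scanning all 7 prefix keys with startswith and slicing, B computes the unique candidate prefix via endswith and a single length-based slice and does one dict-membership test per direction.
import Mathlib
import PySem

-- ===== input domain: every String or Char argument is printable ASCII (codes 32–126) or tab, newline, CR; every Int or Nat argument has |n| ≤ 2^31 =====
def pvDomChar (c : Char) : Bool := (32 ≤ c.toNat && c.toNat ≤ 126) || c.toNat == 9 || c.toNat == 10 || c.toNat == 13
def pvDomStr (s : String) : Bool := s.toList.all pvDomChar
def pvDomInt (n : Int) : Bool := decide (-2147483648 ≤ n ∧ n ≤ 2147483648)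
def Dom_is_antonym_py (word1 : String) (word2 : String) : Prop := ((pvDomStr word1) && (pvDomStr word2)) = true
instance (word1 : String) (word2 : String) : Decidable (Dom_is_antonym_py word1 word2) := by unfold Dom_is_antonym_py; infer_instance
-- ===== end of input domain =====

-- B replaces the 7-key startswith scan by computing the unique candidate prefix (endswith + one slice)
-- and a single membership test per direction: simpler, one lookup instead of a key loop.


-- ===== PORT A =====
-- the keys of ANTONYM_PREFIXES in insertion order (the stem lists are never read by _is_antonym)
def antonymPrefixKeys : List String := ["un", "dis", "in", "im", "ir", "non", "anti"]

-- A's for-loop over the dict keys with its two early returns, as structural recursion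
def isAntonymLoopA (word1 word2 : String) : List String → Bool
  | [] => false
  | p :: rest =>
    if PySem.Str.startswith word1 p && (PySem.Str.slice word1 (some (PySem.Str.len p)) none == word2) then true
    else if PySem.Str.startswith word2 p && (PySem.Str.slice word2 (some (PySem.Str.len p)) none == word1) then true
    else isAntonymLoopA word1 word2 rest

def is_antonym_py (word1 : String) (word2 : String) : Bool :=
  isAntonymLoopA word1 word2 antonymPrefixKeys

-- ===== PORT B =====
-- B's loop body: a.endswith(b) and a[:len(a)-len(b)] in ANTONYM_PREFIXES
def isAntonymCheckB (a b : String) : Bool :=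
  PySem.Str.endswith a b &&
    antonymPrefixKeys.contains (PySem.Str.slice a none (some (PySem.Str.len a - PySem.Str.len b)))

-- B's for-loop over the two ordered pairs with its early return
def is_antonym_py_alt (word1 : String) (word2 : String) : Bool :=
  isAntonymCheckB word1 word2 || isAntonymCheckB word2 word1

-- ===== PRECONDITION & SPEC =====
def Spec_is_antonym_py (word1 : String) (word2 : String) (out : Bool) : Prop := out = is_antonym_py_alt word1 word2
instance (word1 : String) (word2 : String) (out : Bool) : Decidable (Spec_is_antonym_py word1 word2 out) := by unfold Spec_is_antonym_py; infer_instance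

-- ===== CLAIM (what is proved, stated in full; the proofs are below) =====
def Claim_equal_is_antonym_py : Prop := ∀ (word1 : String) (word2 : String), Dom_is_antonym_py word1 word2 → Spec_is_antonym_py word1 word2 (is_antonym_py word1 word2)

-- ===== LEMMAS AND PROOFS =====

-- A's per-key test in one direction holds iff the word is literally prefix ++ other word
lemma atomA_eq (a b p : String) :
    (PySem.Str.startswith a p && (PySem.Str.slice a (some (PySem.Str.len p)) none == b))
      = decide (a.toList = p.toList ++ b.toList) := by
  rw [Bool.eq_iff_iff]
  simp only [Bool.and_eq_true, beq_iff_eq, decide_eq_true_eq]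
  rw [PySem.Str.startswith_eq, PySem.Chars.startswith_iff]
  constructor
  · rintro ⟨⟨t, ht⟩, hs⟩
    rw [← String.toList_inj] at hs
    simp only [PySem.Str.toList_slice] at hs
    rw [← ht] at hs ⊢
    simp at hs
    rw [hs]
  · intro h
    refine ⟨⟨b.toList, h.symm⟩, ?_⟩
    rw [← String.toList_inj]
    simp only [PySem.Str.toList_slice]
    simp [h]

-- B's check equals the existential over the keys
lemma checkB_eq (a b : String) :
    isAntonymCheckB a b = antonymPrefixKeys.any (fun p => decide (a.toList = p.toList ++ b.toList)) := by
  rw [Bool.eq_iff_iff]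
  simp only [isAntonymCheckB, Bool.and_eq_true, List.any_eq_true, decide_eq_true_eq,
    List.contains_eq_mem, decide_eq_true_eq]
  rw [PySem.Str.endswith_eq, PySem.Chars.endswith_iff]
  constructor
  · rintro ⟨⟨t, ht⟩, hc⟩
    refine ⟨_, hc, ?_⟩
    have hlen : PySem.Str.len a - PySem.Str.len b = ((t.length : Nat) : Int) := by
      have := congrArg List.length ht
      simp at this
      simp [PySem.Str.len]
      omega
    have hslice : (PySem.Str.slice a none (some (PySem.Str.len a - PySem.Str.len b))).toList = t := by
      rw [hlen]
      simp only [PySem.Str.toList_slice]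
      simp [← ht]
    rw [hslice, ht]
  · rintro ⟨p, hp, h⟩
    have hlen : PySem.Str.len a - PySem.Str.len b = ((p.toList.length : Nat) : Int) := by
      have := congrArg List.length h
      simp at this
      simp [PySem.Str.len]
      omega
    have hslice : PySem.Str.slice a none (some (PySem.Str.len a - PySem.Str.len b)) = p := by
      rw [← String.toList_inj]
      rw [hlen]
      simp only [PySem.Str.toList_slice]
      simp [h]
    refine ⟨⟨p.toList, h.symm⟩, ?_⟩
    rw [hslice]
    exact hp

-- A's key loop computes the disjunction of the two existentials over the keys
lemma loopA_eq (w1 w2 : String) : ∀ ks : List String,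
    isAntonymLoopA w1 w2 ks
      = (ks.any (fun p => decide (w1.toList = p.toList ++ w2.toList))
          || ks.any (fun p => decide (w2.toList = p.toList ++ w1.toList)))
  | [] => by simp [isAntonymLoopA]
  | p :: rest => by
    rw [isAntonymLoopA, atomA_eq, atomA_eq, loopA_eq w1 w2 rest]
    simp only [List.any_cons, Bool.if_true_left]
    cases decide (w1.toList = p.toList ++ w2.toList) <;>
      cases decide (w2.toList = p.toList ++ w1.toList) <;>
      cases rest.any (fun p => decide (w1.toList = p.toList ++ w2.toList)) <;>
      cases rest.any (fun p => decide (w2.toList = p.toList ++ w1.toList)) <;> rfl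

-- ===== VERDICT (by name: the statement is the Claim_ definition above) =====
theorem is_antonym_py_spec : Claim_equal_is_antonym_py := by
  intro w1 w2 _
  unfold Spec_is_antonym_py is_antonym_py is_antonym_py_alt
  rw [checkB_eq, checkB_eq, loopA_eq]
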